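-- pv_equiv track=rewrite | github.com/SiddharthDhanasekar/prufia-new72325sidd | app/services/ai_engine/update/final_score.py | evaluate_clearance
-- ===== SOURCE A (Python) =====
-- def evaluate_clearance(cluster_result):
--     # Sort clusters by trap priority — traps must be named clearly
--     trap_keywords = ["trap", "block", "firewall"]
--     trap_mismatches = [r for r in cluster_result if r['outcome'].lower() == 'mismatch' and any(k in r['rule'].lower() for k in trap_keywords)]
--
--     if trap_mismatches:
--         return {
--             "status": "MISMATCH",
--             "reason": f"Blocked by trap: {trap_mismatches[0]['rule']}"
--         }
--
--     # Check if any matching cluster passed (soft identity confirmation)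
--     has_match = any(r['outcome'].lower() == 'match' or r['outcome'].lower() == 'pass' for r in cluster_result)
--     if has_match:
--         return {
--             "status": "MATCH",
--             "reason": "At least one cluster passed"
--         }
--
--     # Default: nothing matched, no trap hit — deny access
--     return {
--         "status": "MISMATCH",
--         "reason": "No matching cluster"
--     }
-- ===== SOURCE B (Python) =====
-- def evaluate_clearance(cluster_result):
--     # Table-driven: rank every record once (0 = trap mismatch, 1 = match/pass,
--     # 2 = anything else), then decide from the minimum rank and look the trap
--     # rule back up by the position of the first rank-0 entry.
--     trap_keywords = ["trap", "block", "firewall"]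
--
--     def rank(r):
--         o = r['outcome'].lower()
--         if o == 'mismatch':
--             if any(k in r['rule'].lower() for k in trap_keywords):
--                 return 0
--         elif o == 'match' or o == 'pass':
--             return 1
--         return 2
--
--     ranks = [rank(r) for r in cluster_result]
--     best = min(ranks, default=3)
--     if best == 0:
--         rule = cluster_result[ranks.index(0)]['rule']
--         return {"status": "MISMATCH", "reason": f"Blocked by trap: {rule}"}
--     if best == 1:
--         return {"status": "MATCH", "reason": "At least one cluster passed"}
--     return {"status": "MISMATCH", "reason": "No matching cluster"}
-- ===== Notes on version B (the rewrite author's own statement) =====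
-- stated objective: alternative
-- what changed: Replaces A's staged scans (a filter comprehension collecting all trap mismatches, then an any() scan for matches) with a rank table: each record is scored 0/1/2 once, the verdict is min(ranks), and the trap rule is recovered by ranks.index(0) plus list indexing.
import Mathlib
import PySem

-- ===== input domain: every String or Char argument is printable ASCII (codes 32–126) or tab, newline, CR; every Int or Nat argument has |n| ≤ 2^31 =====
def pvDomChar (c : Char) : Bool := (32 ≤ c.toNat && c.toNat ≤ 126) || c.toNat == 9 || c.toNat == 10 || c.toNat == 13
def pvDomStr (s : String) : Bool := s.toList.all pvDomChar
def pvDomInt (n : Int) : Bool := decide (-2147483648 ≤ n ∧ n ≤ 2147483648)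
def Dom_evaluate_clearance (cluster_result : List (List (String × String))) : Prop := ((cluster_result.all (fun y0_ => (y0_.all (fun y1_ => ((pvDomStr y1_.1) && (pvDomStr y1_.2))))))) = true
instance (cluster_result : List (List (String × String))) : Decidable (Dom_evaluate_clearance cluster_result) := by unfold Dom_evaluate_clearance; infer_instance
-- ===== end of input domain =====

-- B replaces A's filter-then-any staged scans by a rank table: every record is scored once
-- (0 trap-mismatch, 1 match/pass, 2 other), the verdict is the minimum score and the trap
-- rule is looked back up by list index; return value only.

-- ===== PORT A =====
-- records are Python dicts, ported as assoc lists read via PySem.Dict (first-match lookup)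
def pvLowerOutcome (r : List (String × String)) : String :=
  PySem.Str.lower ((PySem.Dict.mk r).getD "outcome" "")

def pvRuleOf (r : List (String × String)) : String :=
  (PySem.Dict.mk r).getD "rule" ""

def pvTrapKeywords : List String := ["trap", "block", "firewall"]

-- the comprehension's condition
def pvIsTrapMismatch (r : List (String × String)) : Bool :=
  pvLowerOutcome r == "mismatch" &&
    pvTrapKeywords.any (fun k => PySem.Str.isIn k (PySem.Str.lower (pvRuleOf r)))

-- the has_match generator's condition
def pvIsMatchy (r : List (String × String)) : Bool :=
  pvLowerOutcome r == "match" || pvLowerOutcome r == "pass"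

def evaluate_clearance (cluster_result : List (List (String × String))) : List (String × String) :=
  let trap_mismatches := cluster_result.filter pvIsTrapMismatch
  match trap_mismatches with
  | r :: _ =>
      [("status", "MISMATCH"), ("reason", "Blocked by trap: " ++ pvRuleOf r)]
  | [] =>
      let has_match := cluster_result.any pvIsMatchy
      if has_match then
        [("status", "MATCH"), ("reason", "At least one cluster passed")]
      else
        [("status", "MISMATCH"), ("reason", "No matching cluster")]

-- ===== PORT B =====
-- rank(r) from Source B: 0 = trap mismatch, 1 = match/pass, 2 = anything else
def pvTrapHitB (r : List (String × String)) : Bool :=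
  ["trap", "block", "firewall"].any
    (fun k => PySem.Str.isIn k (PySem.Str.lower ((PySem.Dict.mk r).getD "rule" "")))

def pvRank (r : List (String × String)) : Int :=
  let o := PySem.Str.lower ((PySem.Dict.mk r).getD "outcome" "")
  if o == "mismatch" then
    if pvTrapHitB r then 0 else 2
  else if o == "match" || o == "pass" then 1
  else 2

def evaluate_clearance_alt (cluster_result : List (List (String × String))) : List (String × String) :=
  let ranks := cluster_result.map pvRank
  let best := PySem.List.minD ranks (fun x => x) 3
  if best == 0 then
    -- ranks.index(0) always succeeds here (0 is the minimum, so it occurs); getD 0 discharges the Option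
    let idx : Nat := (PySem.List.index? ranks 0).getD 0
    let rule := (PySem.Dict.mk (PySem.List.pyGetD cluster_result (idx : Int) [])).getD "rule" ""
    [("status", "MISMATCH"), ("reason", "Blocked by trap: " ++ rule)]
  else if best == 1 then
    [("status", "MATCH"), ("reason", "At least one cluster passed")]
  else
    [("status", "MISMATCH"), ("reason", "No matching cluster")]

-- ===== PRECONDITION & SPEC =====
-- Pre_ excludes exactly the inputs where Python A raises KeyError: a record without an
-- 'outcome' key, or a record whose outcome lowercases to 'mismatch' without a 'rule' key.
def Pre_evaluate_clearance (cluster_result : List (List (String × String))) : Prop :=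
  ∀ r ∈ cluster_result,
    (PySem.Dict.mk r).contains "outcome" = true ∧
    (PySem.Str.lower ((PySem.Dict.mk r).getD "outcome" "") = "mismatch" →
      (PySem.Dict.mk r).contains "rule" = true)

instance (cluster_result : List (List (String × String))) : Decidable (Pre_evaluate_clearance cluster_result) := by
  unfold Pre_evaluate_clearance; infer_instance

def pvWitness_evaluate_clearance : (List (List (String × String))) :=
  [[("outcome", "match"), ("rule", "r1")], [("outcome", "nope"), ("rule", "trapdoor")]]

def Spec_evaluate_clearance (cluster_result : List (List (String × String))) (out : List (String × String)) : Prop := out = evaluate_clearance_alt cluster_result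
instance (cluster_result : List (List (String × String))) (out : List (String × String)) : Decidable (Spec_evaluate_clearance cluster_result out) := by unfold Spec_evaluate_clearance; infer_instance

-- ===== CLAIM (what is proved, stated in full; the proofs are below) =====
def Claim_equal_evaluate_clearance : Prop := ∀ (cluster_result : List (List (String × String))), Dom_evaluate_clearance cluster_result → Pre_evaluate_clearance cluster_result → Spec_evaluate_clearance cluster_result (evaluate_clearance cluster_result)

-- ===== LEMMAS AND PROOFS =====

-- B's trap test is A's trap test, term for term
theorem pvTrapHitB_eq (r : List (String × String)) :
    pvTrapHitB r =
      pvTrapKeywords.any (fun k => PySem.Str.isIn k (PySem.Str.lower (pvRuleOf r))) := rfl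

-- B's rank through A's predicates
theorem pvRank_eq (r : List (String × String)) :
    pvRank r = if pvIsTrapMismatch r then 0 else if pvIsMatchy r then 1 else 2 := by
  unfold pvRank pvIsTrapMismatch pvIsMatchy pvLowerOutcome
  rw [← pvTrapHitB_eq]
  by_cases hm : PySem.Str.lower ((PySem.Dict.mk r).getD "outcome" "") = "mismatch"
  · cases ht : pvTrapHitB r <;> simp [hm]
  · simp [hm]

theorem pvRank_eq_zero_iff (r : List (String × String)) :
    pvRank r = 0 ↔ pvIsTrapMismatch r = true := by
  rw [pvRank_eq]
  cases h1 : pvIsTrapMismatch r <;> cases h2 : pvIsMatchy r <;> simp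

theorem pvRank_eq_one_iff (r : List (String × String)) :
    pvRank r = 1 ↔ pvIsMatchy r = true := by
  rw [pvRank_eq]
  cases h1 : pvIsTrapMismatch r <;> cases h2 : pvIsMatchy r <;> simp
  -- impossible: a trap mismatch has outcome 'mismatch', which is neither 'match' nor 'pass'
  simp [pvIsTrapMismatch] at h1
  simp [pvIsMatchy, h1.1] at h2

theorem pvRank_cases (r : List (String × String)) :
    pvRank r = 0 ∨ pvRank r = 1 ∨ pvRank r = 2 := by
  rw [pvRank_eq]; split_ifs <;> simp

-- the first trap mismatch is recovered by ranks.index(0): index? succeeds and indexing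
-- returns exactly the head of A's filter
theorem pvIndex_zero_finds_filter_head (cr : List (List (String × String)))
    (fr : List (String × String)) (l : List (List (String × String)))
    (h : cr.filter pvIsTrapMismatch = fr :: l) :
    ∃ k : Nat, PySem.List.index? (cr.map pvRank) 0 = some k ∧
      PySem.List.pyGetD cr (k : Int) [] = fr := by
  induction cr generalizing fr l with
  | nil => simp at h
  | cons r tl ih =>
    by_cases htm : pvIsTrapMismatch r = true
    · have hr0 : pvRank r = 0 := (pvRank_eq_zero_iff r).2 htm
      have hfr : fr = r := by simp [htm] at h; exact h.1.symm
      refine ⟨0, ?_, ?_⟩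
      · rw [List.map_cons, hr0]; exact PySem.List.index?_cons_self 0 _
      · simp [hfr, PySem.List.pyGetD_zero_cons]
    · have hr0 : pvRank r ≠ 0 := fun hc => htm ((pvRank_eq_zero_iff r).1 hc)
      have h' : tl.filter pvIsTrapMismatch = fr :: l := by
        simpa [htm] using h
      obtain ⟨k, hk, hg⟩ := ih fr l h'
      refine ⟨k + 1, ?_, ?_⟩
      · rw [List.map_cons, PySem.List.index?_cons_of_ne _ hr0, hk]; rfl
      · rw [PySem.List.pyGetD_natCast, List.getD_cons_succ]
        rw [PySem.List.pyGetD_natCast] at hg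
        exact hg

-- ===== VERDICT (by name: the statement is the Claim_ definition above) =====
theorem evaluate_clearance_spec : Claim_equal_evaluate_clearance := by
  intro cr _hdom _hpre
  unfold Spec_evaluate_clearance evaluate_clearance evaluate_clearance_alt
  cases hf : cr.filter pvIsTrapMismatch with
  | cons fr l =>
    -- trap branch: min rank is 0 and indexing recovers fr
    obtain ⟨k, hk, hg⟩ := pvIndex_zero_finds_filter_head cr fr l hf
    have hfrmem : fr ∈ cr := List.mem_of_mem_filter (by rw [hf]; exact List.mem_cons_self)
    have h0mem : (0 : Int) ∈ cr.map pvRank := by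
      have hfr0 : pvRank fr = 0 := (pvRank_eq_zero_iff fr).2
        (List.of_mem_filter (by rw [hf]; exact List.mem_cons_self))
      exact List.mem_map.2 ⟨fr, hfrmem, hfr0⟩
    cases hm : PySem.List.min? (cr.map pvRank) (fun x => x) with
    | none =>
      rw [PySem.List.min?_eq_none_iff] at hm
      rw [hm] at h0mem; simp at h0mem
    | some m =>
      have hm0 : m = 0 := by
        have hle : m ≤ 0 := PySem.List.min?_isMin hm 0 h0mem
        obtain ⟨x, _, hx⟩ := List.mem_map.1 (PySem.List.min?_mem hm)
        have := pvRank_cases x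
        omega
      simp only [PySem.List.minD, hm, hm0, Option.getD_some, hk, hg]
      simp [pvRuleOf]
  | nil =>
    have hnot0 : ∀ x ∈ cr, pvRank x ≠ 0 := by
      intro x hx hc
      have : pvIsTrapMismatch x = true := (pvRank_eq_zero_iff x).1 hc
      have : x ∈ cr.filter pvIsTrapMismatch := List.mem_filter.2 ⟨hx, this⟩
      rw [hf] at this; simp at this
    cases ha : cr.any pvIsMatchy with
    | true =>
      obtain ⟨y, hy, hmy⟩ := List.any_eq_true.1 ha
      have hy1 : pvRank y = 1 := (pvRank_eq_one_iff y).2 hmy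
      have h1mem : (1 : Int) ∈ cr.map pvRank := List.mem_map.2 ⟨y, hy, hy1⟩
      cases hm : PySem.List.min? (cr.map pvRank) (fun x => x) with
      | none =>
        rw [PySem.List.min?_eq_none_iff] at hm
        rw [hm] at h1mem; simp at h1mem
      | some m =>
        have hm1 : m = 1 := by
          have hle : m ≤ 1 := PySem.List.min?_isMin hm 1 h1mem
          obtain ⟨x, hxm, hx⟩ := List.mem_map.1 (PySem.List.min?_mem hm)
          have := pvRank_cases x
          have := hnot0 x hxm
          omega
        simp [PySem.List.minD, hm, hm1]
    | false =>
      have hnot1 : ∀ x ∈ cr, pvRank x ≠ 1 := by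
        intro x hx hc
        have : pvIsMatchy x = true := (pvRank_eq_one_iff x).1 hc
        exact (List.any_eq_false.1 (by simpa using ha)) x hx (by simpa using this)
      cases hm : PySem.List.min? (cr.map pvRank) (fun x => x) with
      | none => simp [PySem.List.minD, hm]
      | some m =>
        have hm2 : m = 2 := by
          obtain ⟨x, hxm, hx⟩ := List.mem_map.1 (PySem.List.min?_mem hm)
          have := pvRank_cases x
          have := hnot0 x hxm
          have := hnot1 x hxm
          omega
        simp [PySem.List.minD, hm, hm2]
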